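-- pv_equiv track=rewrite | github.com/haider-wq/erp_addons | integration/models/external/integration_product_public_category_external.py | find_loop_category
-- ===== SOURCE A (Python) =====
-- def find_loop_category(categories):
--     categories_dict = {
--         category['id']: category
--         for category in categories if 'id_parent' in category
--     }
--
--     def find_loop(category, stack):
--         if category in stack:
--             return stack[stack.index(category):]
--         stack.append(category)
--         if category['id_parent'] in categories_dict:
--             parent = categories_dict[category['id_parent']]
--             result = find_loop(parent, stack)
--             if result:
--                 return result
--         stack.pop()
--         return []
--
--     for category in categories_dict.values():
--         cycle = find_loop(category, [])
--         if cycle: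
--             return cycle[0].get('id')
--
--     return None
-- ===== SOURCE B (Python) =====
-- def find_loop_category(categories):
--     # Build the id -> parent-id functional graph once, then detect a cycle with
--     # the classic white/grey/black colouring walk, memoised across start nodes.
--     parent = {}
--     for category in categories:
--         if 'id_parent' in category:
--             parent[category['id']] = category['id_parent']
--
--     color = {}  # missing/0 = unvisited, 1 = on current path, 2 = known cycle-free
--     for start in parent:
--         if color.get(start, 0) != 0:
--             continue
--         node = start
--         path = []
--         while node in parent and color.get(node, 0) == 0:
--             color[node] = 1
--             path.append(node)
--             node = parent[node]
--         if node in parent and color.get(node, 0) == 1: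
--             return node
--         for n in path:
--             color[n] = 2
--     return None
-- ===== Notes on version B (the rewrite author's own statement) =====
-- stated objective: alternative
-- what changed: A restarts a recursive parent-chain walk from every node with a fresh stack and linear list-membership scans over dict values; B builds the id->parent map once and runs an iterative white/grey/black colouring walk memoised across start nodes, so no chain segment is ever re-walked.
import Mathlib
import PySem

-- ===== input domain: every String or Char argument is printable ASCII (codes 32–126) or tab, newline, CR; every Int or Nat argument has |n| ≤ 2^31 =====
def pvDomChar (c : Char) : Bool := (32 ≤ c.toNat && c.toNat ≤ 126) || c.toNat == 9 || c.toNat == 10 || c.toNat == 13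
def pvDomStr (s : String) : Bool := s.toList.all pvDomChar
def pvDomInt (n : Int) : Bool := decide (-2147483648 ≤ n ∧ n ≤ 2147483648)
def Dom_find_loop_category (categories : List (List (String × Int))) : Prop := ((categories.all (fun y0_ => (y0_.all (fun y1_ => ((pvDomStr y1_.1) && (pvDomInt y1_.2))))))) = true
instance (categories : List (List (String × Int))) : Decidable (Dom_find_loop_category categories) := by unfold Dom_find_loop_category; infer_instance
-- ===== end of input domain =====

-- B replaces A's per-start recursive stack walk (repeated restarts, linear list-membership
-- scans) by a single id-level white/grey/black colouring walk memoised across start nodes.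

-- ===== PORT A =====
-- Each Python `category` is a dict encoded as an assoc list; all dict operations go through
-- PySem.Dict.ofList (duplicate keys collapse last-wins keeping first position — Python's dict).
/-- Python `c == d` on two dicts (order-insensitive key/value equality). -/
def pyDictEq (c d : List (String × Int)) : Bool :=
  (PySem.Dict.ofList c).size == (PySem.Dict.ofList d).size &&
  (PySem.Dict.ofList c).items.all (fun kv => (PySem.Dict.ofList d).get? kv.1 == some kv.2)

/-- Python `'k' in category`. -/
def pvHasKey (c : List (String × Int)) (k : String) : Bool := (PySem.Dict.ofList c).contains k

/-- Python `category['id']`; a missing 'id' raises KeyError there, which Pre_ excludes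
    (the default 0 is only ever produced outside Pre_). -/
def pvCatId (c : List (String × Int)) : Int := (PySem.Dict.ofList c).getD "id" 0

/-- Python `category['id_parent']` (only evaluated on dicts that contain the key). -/
def pvCatParent (c : List (String × Int)) : Int := (PySem.Dict.ofList c).getD "id_parent" 0

/-- The dict comprehension building `categories_dict`. -/
def buildDict (categories : List (List (String × Int))) : PySem.Dict Int (List (String × Int)) :=
  categories.foldl
    (fun d c => if pvHasKey c "id_parent" then d.insert (pvCatId c) c else d)
    PySem.Dict.empty

/-- A's recursive `find_loop(category, stack)`.  The mutated Python stack is passed by value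
    (append on entry, pop exactly on every `return []`, so call-by-value is observationally
    identical for the returned value).  `stack.index(category)` uses Python `==` on dicts, so it
    is hand-ported as `List.findIdx` over `pyDictEq` (`PySem.List.index?` would use `BEq`).
    The fuel only makes the recursion structural: the Python call depth never exceeds
    `categories_dict` size + 1 (stack entries are pairwise `!=` values of the dict), so the
    fuel `cdict.size + 1` supplied below is never exhausted. -/
def findLoop (cdict : PySem.Dict Int (List (String × Int))) :
    Nat → List (String × Int) → List (List (String × Int)) → List (List (String × Int))
  | 0, _, _ => []
  | fuel+1, category, stack =>
    if stack.any (fun s => pyDictEq s category) then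
      stack.drop (stack.findIdx (fun s => pyDictEq s category))   -- stack[stack.index(category):]
    else
      match cdict.get? (pvCatParent category) with
      | some parent =>
          let result := findLoop cdict fuel parent (stack ++ [category])
          if result.isEmpty then [] else result
      | none => []

/-- A's outer `for category in categories_dict.values()` with its early return. -/
def loopA (cdict : PySem.Dict Int (List (String × Int))) :
    List (List (String × Int)) → Option Int
  | [] => none
  | v :: vs =>
    match findLoop cdict (cdict.size + 1) v [] with
    | [] => loopA cdict vs
    | c0 :: _ => (PySem.Dict.ofList c0).get? "id"   -- return cycle[0].get('id')

def find_loop_category (categories : List (List (String × Int))) : Option Int :=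
  let cdict := buildDict categories
  loopA cdict cdict.values

-- ===== PORT B =====
/-- Source B's first loop: the id → parent-id functional graph. -/
def buildParent (categories : List (List (String × Int))) : PySem.Dict Int Int :=
  categories.foldl
    (fun d c => if pvHasKey c "id_parent" then d.insert (pvCatId c) (pvCatParent c) else d)
    PySem.Dict.empty

/-- Source B's `while` loop: follow parents while the node is an uncoloured key, greying the path.
    Each iteration greys a fresh key, so the fuel `par.size + 1` supplied below is never
    exhausted (the guard only makes the loop structural). -/
def bwalk (par : PySem.Dict Int Int) :
    Nat → Int → PySem.Dict Int Int → List Int → Int × PySem.Dict Int Int × List Int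
  | 0, node, color, path => (node, color, path)
  | f+1, node, color, path =>
    if par.contains node && (color.getD node 0 == 0) then
      bwalk par f (par.getD node 0) (color.insert node 1) (path ++ [node])
    else (node, color, path)

/-- Source B's outer `for start in parent` loop carrying the colour dict. -/
def bloop (par : PySem.Dict Int Int) : List Int → PySem.Dict Int Int → Option Int
  | [], _ => none
  | start :: ks, color =>
    if color.getD start 0 != 0 then bloop par ks color
    else
      match bwalk par (par.size + 1) start color [] with
      | (node, color2, path) =>
        if par.contains node && (color2.getD node 0 == 1) then some node
        else bloop par ks (path.foldl (fun c n => c.insert n 2) color2)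

def find_loop_category_alt (categories : List (List (String × Int))) : Option Int :=
  let par := buildParent categories
  bloop par par.keys PySem.Dict.empty

-- ===== PRECONDITION & SPEC =====
-- Pre_ excludes exactly the inputs on which the Python raises KeyError: a category that
-- contains 'id_parent' but no 'id' (A's dict comprehension and B's first loop both evaluate
-- category['id'] on it and raise).
def Pre_find_loop_category (categories : List (List (String × Int))) : Prop :=
  ∀ c ∈ categories,
    (c.map Prod.fst).contains "id_parent" = true → (c.map Prod.fst).contains "id" = true

instance (categories : List (List (String × Int))) : Decidable (Pre_find_loop_category categories) := by
  unfold Pre_find_loop_category; infer_instance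

def pvWitness_find_loop_category : (List (List (String × Int))) :=
  [[("id", 1), ("id_parent", 2)], [("id", 2), ("id_parent", 1)]]

def Spec_find_loop_category (categories : List (List (String × Int))) (out : Option Int) : Prop :=
  out = find_loop_category_alt categories
instance (categories : List (List (String × Int))) (out : Option Int) : Decidable (Spec_find_loop_category categories out) := by
  unfold Spec_find_loop_category; infer_instance

-- ===== CLAIM (what is proved, stated in full; the proofs are below) =====
def Claim_equal_find_loop_category : Prop :=
  ∀ (categories : List (List (String × Int))), Dom_find_loop_category categories →
    Pre_find_loop_category categories →
    Spec_find_loop_category categories (find_loop_category categories)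

-- ===== LEMMAS AND PROOFS =====

-- ---- the id-level walk both ports are reduced to ----
/-- `j` steps of the parent map, `none` once the chain leaves the keys. -/
def iterP (par : PySem.Dict Int Int) : Nat → Int → Option Int
  | 0, k => some k
  | j+1, k =>
    match par.get? k with
    | some k2 => iterP par j k2
    | none => none

/-- the abstract content of A's per-start walk: follow parents, return the first repeat. -/
def awalk (par : PySem.Dict Int Int) : Nat → Int → List Int → Option Int
  | 0, _, _ => none
  | f+1, k, seen =>
    if k ∈ seen then some k
    else
      match par.get? k with
      | some k2 => awalk par f k2 (seen ++ [k])
      | none => none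

/-- A's outer loop at id level: restart the walk from every key until a cycle is hit. -/
def aloop (par : PySem.Dict Int Int) : List Int → Option Int
  | [] => none
  | k :: ks =>
    match awalk par (par.size + 1) k [] with
    | some c => some c
    | none => aloop par ks

/-- `s` reaches `k` in at least one parent step. -/
def Reach1 (par : PySem.Dict Int Int) (s k : Int) : Prop := ∃ i, 1 ≤ i ∧ iterP par i s = some k
/-- the parent chain from `k` eventually leaves the keys (so it never cycles). -/
def DeadP (par : PySem.Dict Int Int) (k : Int) : Prop := ∃ j, iterP par j k = none

theorem iterP_add (par : PySem.Dict Int Int) (a b : Nat) (k : Int) :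
    iterP par (a + b) k =
      match iterP par a k with
      | some t => iterP par b t
      | none => none := by
  induction a generalizing k with
  | zero => simp [iterP]
  | succ a ih =>
    have : a + 1 + b = (a + b) + 1 := by omega
    rw [this]
    simp only [iterP]
    cases h : par.get? k with
    | some k' => exact ih k'
    | none => rfl

theorem iterP_none_mono (par : PySem.Dict Int Int) {i j : Nat} {k : Int} (hij : i ≤ j)
    (h : iterP par i k = none) : iterP par j k = none := by
  have : j = i + (j - i) := by omega
  rw [this, iterP_add, h]

theorem not_dead_of_reach1_self (par : PySem.Dict Int Int) {k : Int} (h : Reach1 par k k) :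
    ¬ DeadP par k := by
  rintro ⟨j, hj⟩
  obtain ⟨m, hm1, hmk⟩ := h
  have hmul : ∀ q : Nat, iterP par (q * m) k = some k := by
    intro q
    induction q with
    | zero => simp [iterP]
    | succ q ih =>
      have : (q + 1) * m = q * m + m := by ring
      rw [this, iterP_add, ih]
      exact hmk
  have hle : j ≤ j * m := Nat.le_mul_of_pos_right j (by omega)
  have h2 := iterP_none_mono par hle hj
  rw [hmul j] at h2
  simp at h2

theorem reach1_step (par : PySem.Dict Int Int) {s k k' : Int} (hk : par.get? k = some k')
    (h : Reach1 par s k) : Reach1 par s k' := by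
  obtain ⟨i, h1, hi⟩ := h
  exact ⟨i + 1, by omega, by rw [iterP_add, hi]; simp [iterP, hk]⟩

theorem reach1_of_step (par : PySem.Dict Int Int) {k k' : Int} (hk : par.get? k = some k') :
    Reach1 par k k' := ⟨1, le_refl 1, by simp [iterP, hk]⟩

theorem dead_back (par : PySem.Dict Int Int) {d n : Int} (h : Reach1 par d n)
    (hn : DeadP par n) : DeadP par d := by
  obtain ⟨i, _, hi⟩ := h
  obtain ⟨j, hj⟩ := hn
  exact ⟨i + j, by rw [iterP_add, hi]; exact hj⟩

theorem dead_of_none (par : PySem.Dict Int Int) {n : Int} (h : par.get? n = none) :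
    DeadP par n := ⟨1, by simp [iterP, h]⟩

theorem dead_tail (par : PySem.Dict Int Int) {k k' : Int} (h : DeadP par k)
    (hk : par.get? k = some k') : DeadP par k' := by
  obtain ⟨j, hj⟩ := h
  cases j with
  | zero => simp [iterP] at hj
  | succ j =>
    refine ⟨j, ?_⟩
    simpa [iterP, hk] using hj

theorem awalk_dead (par : PySem.Dict Int Int) :
    ∀ (f : Nat) (k : Int) (seen : List Int), DeadP par k →
      (∀ s ∈ seen, Reach1 par s k) → awalk par f k seen = none := by
  intro f
  induction f with
  | zero => intro k seen _ _; rfl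
  | succ f ih =>
    intro k seen hdead hseen
    simp only [awalk]
    split
    · exact absurd hdead (not_dead_of_reach1_self par (hseen k ‹k ∈ seen›))
    · cases h : par.get? k with
      | some k' =>
        exact ih k' (seen ++ [k]) (dead_tail par hdead h) (by
          intro s hs
          rcases List.mem_append.mp hs with hs | hs
          · exact reach1_step par h (hseen s hs)
          · simp only [List.mem_singleton] at hs
            subst hs; exact reach1_of_step par h)
      | none => rfl

theorem nodup_length_le (l1 l2 : List Int) (h1 : l1.Nodup) (hs : ∀ x ∈ l1, x ∈ l2) :
    l1.length ≤ l2.length := by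
  classical
  calc l1.length = l1.toFinset.card := (List.toFinset_card_of_nodup h1).symm
    _ ≤ l2.toFinset.card := Finset.card_le_card (by intro x hx; simp only [List.mem_toFinset] at *; exact hs x hx)
    _ ≤ l2.length := l2.toFinset_card_le

theorem keys_length_eq_size (par : PySem.Dict Int Int) : par.keys.length = par.size := by
  simp [PySem.Dict.keys, PySem.Dict.size]

theorem getD_foldl_insert_two (l : List Int) (c : PySem.Dict Int Int) (d : Int) :
    (l.foldl (fun c n => c.insert n 2) c).getD d 0 = if d ∈ l then 2 else c.getD d 0 := by
  induction l generalizing c with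
  | nil => simp
  | cons n l ih =>
    simp only [List.foldl_cons, ih, PySem.Dict.getD_insert, List.mem_cons]
    by_cases h1 : d ∈ l <;> by_cases h2 : d = n <;> simp [h1, h2]

theorem bwalk_spec (par : PySem.Dict Int Int) :
    ∀ (f : Nat) (k : Int) (color : PySem.Dict Int Int) (path : List Int),
      par.size + 1 ≤ f + path.length →
      path.Nodup →
      (∀ s ∈ path, s ∈ par.keys) →
      (∀ d, color.getD d 0 = 1 ↔ d ∈ path) →
      (∀ d, color.getD d 0 = 2 → DeadP par d) →
      (∀ d, color.getD d 0 = 0 ∨ color.getD d 0 = 1 ∨ color.getD d 0 = 2) →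
      (∀ s ∈ path, Reach1 par s k) →
      (∀ d, (bwalk par f k color path).2.1.getD d 0 = 1 ↔ d ∈ (bwalk par f k color path).2.2) ∧
      (∀ d, (bwalk par f k color path).2.1.getD d 0 = 2 ↔ color.getD d 0 = 2) ∧
      (∀ d, (bwalk par f k color path).2.1.getD d 0 = 0 ∨ (bwalk par f k color path).2.1.getD d 0 = 1 ∨ (bwalk par f k color path).2.1.getD d 0 = 2) ∧
      (bwalk par f k color path).2.2.Nodup ∧
      (∀ s ∈ (bwalk par f k color path).2.2, s ∈ par.keys) ∧
      (∀ s ∈ (bwalk par f k color path).2.2, Reach1 par s (bwalk par f k color path).1) ∧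
      (awalk par f k path =
        if par.contains (bwalk par f k color path).1 = true ∧
           (bwalk par f k color path).2.1.getD (bwalk par f k color path).1 0 = 1
        then some (bwalk par f k color path).1 else none) ∧
      (¬ (par.contains (bwalk par f k color path).1 = true ∧
          (bwalk par f k color path).2.1.getD (bwalk par f k color path).1 0 = 1) →
        DeadP par (bwalk par f k color path).1) := by
  intro f
  induction f with
  | zero =>
    intro k color path hf hnd hkeys _ _ _ _
    exfalso
    have h1 := nodup_length_le path par.keys hnd hkeys
    rw [keys_length_eq_size] at h1
    omega
  | succ f ih =>
    intro k color path hf hnd hkeys hgray hblack hvals hreach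
    by_cases hc : par.contains k = true ∧ color.getD k 0 = 0
    · -- step case
      have hcond : (par.contains k && (color.getD k 0 == 0)) = true := by
        simp [hc.1, hc.2]
      have hkmem : k ∈ par.keys := (PySem.Dict.contains_iff_mem_keys par k).mp hc.1
      have hknp : k ∉ path := fun hm => by
        have := (hgray k).mpr hm; omega
      obtain ⟨k', hk'⟩ : ∃ k', par.get? k = some k' := by
        have := PySem.Dict.contains_eq_isSome_get? par k
        rw [hc.1] at this
        exact Option.isSome_iff_exists.mp this.symm
      have hgetD : par.getD k 0 = k' := PySem.Dict.getD_of_get?_eq_some par 0 hk'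
      have hbw : bwalk par (f+1) k color path
          = bwalk par f k' (color.insert k 1) (path ++ [k]) := by
        simp only [bwalk, hcond, if_true, hgetD]
      have haw : awalk par (f+1) k path = awalk par f k' (path ++ [k]) := by
        simp [awalk, hknp, hk']
      rw [hbw, haw]
      have ihres := ih k' (color.insert k 1) (path ++ [k])
        (by simp only [List.length_append, List.length_cons, List.length_nil]; omega)
        (by rw [List.nodup_append]
            refine ⟨hnd, List.nodup_singleton k, ?_⟩
            intro a ha b hb hab
            rw [List.mem_singleton] at hb
            exact hknp ((hab.trans hb) ▸ ha))
        (by intro s hs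
            rcases List.mem_append.mp hs with hs | hs
            · exact hkeys s hs
            · rw [List.mem_singleton] at hs; subst hs; exact hkmem)
        (by intro d
            rw [PySem.Dict.getD_insert, List.mem_append, List.mem_singleton]
            by_cases hd : d = k <;> simp [hd, hgray d])
        (by intro d
            rw [PySem.Dict.getD_insert]
            by_cases hd : d = k
            · simp [hd]
            · simp only [hd, if_false]; exact hblack d)
        (by intro d
            rw [PySem.Dict.getD_insert]
            by_cases hd : d = k
            · simp [hd]
            · simp only [hd, if_false]; exact hvals d)
        (by intro s hs
            rcases List.mem_append.mp hs with hs | hs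
            · exact reach1_step par hk' (hreach s hs)
            · rw [List.mem_singleton] at hs; subst hs; exact reach1_of_step par hk')
      refine ⟨ihres.1, ?_, ihres.2.2.1, ihres.2.2.2.1, ihres.2.2.2.2.1, ihres.2.2.2.2.2.1, ihres.2.2.2.2.2.2.1, ihres.2.2.2.2.2.2.2⟩
      · intro d
        rw [ihres.2.1 d, PySem.Dict.getD_insert]
        by_cases hd : d = k
        · subst hd; simp [hc.2]
        · simp [hd]
    · -- stop case
      have hcond : (par.contains k && (color.getD k 0 == 0)) = false := by
        by_cases h : par.contains k = true
        · have : color.getD k 0 ≠ 0 := fun h0 => hc ⟨h, h0⟩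
          simp [h, this]
        · rw [Bool.not_eq_true] at h
          simp [h]
      have hbw : bwalk par (f+1) k color path = (k, color, path) := by
        simp only [bwalk, hcond]; rfl
      rw [hbw]
      have hawa : awalk par (f+1) k path =
          if par.contains k = true ∧ color.getD k 0 = 1 then some k else none := by
        by_cases hcont : par.contains k = true
        · rcases hvals k with h0 | h1 | h2
          · exact absurd ⟨hcont, h0⟩ hc
          · -- grey: k on current path
            have hmem : k ∈ path := (hgray k).mp h1
            simp [awalk, hmem, hcont, h1]
          · -- black: dead, no repeat downstream
            have : awalk par (f+1) k path = none :=
              awalk_dead par (f+1) k path (hblack k h2) hreach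
            rw [this]
            have : ¬ (par.contains k = true ∧ color.getD k 0 = 1) := by
              intro ⟨_, h1⟩; omega
            simp [this]
        · -- not a key: chain ends here
          have hknp : k ∉ path := fun hm => hcont ((PySem.Dict.contains_iff_mem_keys par k).mpr (hkeys k hm))
          have hnone : par.get? k = none := by
            rcases h : par.get? k with _ | w
            · rfl
            · exfalso; apply hcont
              rw [PySem.Dict.contains_eq_isSome_get?, h]; rfl
          have : ¬ (par.contains k = true ∧ color.getD k 0 = 1) := fun ⟨h, _⟩ => hcont h
          simp [awalk, hknp, hnone, this]
      refine ⟨hgray, fun d => Iff.rfl, hvals, hnd, hkeys, hreach, hawa, ?_⟩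
      · intro hng
        by_cases hcont : par.contains k = true
        · rcases hvals k with h0 | h1 | h2
          · exact absurd ⟨hcont, h0⟩ hc
          · exact absurd ⟨hcont, h1⟩ hng
          · exact hblack k h2
        · have hnone : par.get? k = none := by
            rcases h : par.get? k with _ | w
            · rfl
            · exfalso; apply hcont
              rw [PySem.Dict.contains_eq_isSome_get?, h]; rfl
          exact dead_of_none par hnone

theorem bloop_eq_aloop (par : PySem.Dict Int Int) :
    ∀ (ks : List Int) (color : PySem.Dict Int Int),
      (∀ d, color.getD d 0 ≠ 0 → color.getD d 0 = 2 ∧ DeadP par d) →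
      (∀ d, color.getD d 0 = 0 ∨ color.getD d 0 = 1 ∨ color.getD d 0 = 2) →
      bloop par ks color = aloop par ks := by
  intro ks
  induction ks with
  | nil => intro color _ _; rfl
  | cons start ks ih =>
    intro color hcinv hvals
    by_cases hs : color.getD start 0 = 0
    · -- fresh start: run the walk
      have hgray : ∀ d, color.getD d 0 = 1 ↔ d ∈ ([] : List Int) := by
        intro d
        simp only [List.not_mem_nil, iff_false]
        intro h1
        have := (hcinv d (by omega)).1; omega
      have hblack : ∀ d, color.getD d 0 = 2 → DeadP par d := by
        intro d h2; exact (hcinv d (by omega)).2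
      have hw := bwalk_spec par (par.size + 1) start color []
        (by simp) (List.nodup_nil) (by simp) hgray hblack hvals (by simp)
      set r := bwalk par (par.size + 1) start color [] with hr
      have hbl : bloop par (start :: ks) color =
          (if par.contains r.1 && (r.2.1.getD r.1 0 == 1) then some r.1
           else bloop par ks (r.2.2.foldl (fun c n => c.insert n 2) r.2.1)) := by
        simp only [bloop, hs]
        rfl
      have hal : aloop par (start :: ks) =
          (match awalk par (par.size + 1) start [] with
           | some c => some c
           | none => aloop par ks) := rfl
      by_cases hret : par.contains r.1 = true ∧ r.2.1.getD r.1 0 = 1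
      · rw [hbl, hal, hw.2.2.2.2.2.2.1]
        simp [hret.1, hret.2]
      · have hcnd : (par.contains r.1 && (r.2.1.getD r.1 0 == 1)) = false := by
          by_cases h : par.contains r.1 = true
          · have : r.2.1.getD r.1 0 ≠ 1 := fun h1 => hret ⟨h, h1⟩
            simp [h, this]
          · rw [Bool.not_eq_true] at h
            simp [h]
        rw [hbl, hal, hw.2.2.2.2.2.2.1]
        simp only [hret, if_false, hcnd, Bool.false_eq_true]
        have hdead_stop : DeadP par r.1 := hw.2.2.2.2.2.2.2 hret
        apply ih
        · intro d hd
          rw [getD_foldl_insert_two] at hd ⊢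
          by_cases hdp : d ∈ r.2.2
          · refine ⟨by simp [hdp], ?_⟩
            exact dead_back par (hw.2.2.2.2.2.1 d hdp) hdead_stop
          · simp only [hdp, if_false] at hd ⊢
            rcases hw.2.2.1 d with h0 | h1 | h2
            · exact absurd h0 hd
            · exact absurd ((hw.1 d).mp h1) hdp
            · exact ⟨h2, hblack d ((hw.2.1 d).mp h2)⟩
        · intro d
          rw [getD_foldl_insert_two]
          by_cases hdp : d ∈ r.2.2
          · simp [hdp]
          · simp only [hdp, if_false]; exact hw.2.2.1 d
    · -- memoised skip
      have h2 := hcinv start hs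
      have hnone : awalk par (par.size + 1) start [] = none :=
        awalk_dead par _ start [] h2.2 (by simp)
      have : bloop par (start :: ks) color = bloop par ks color := by
        simp only [bloop]
        have h3 : (color.getD start 0 != 0) = true := by simp [hs]
        rw [h3]
        rfl
      rw [this, ih color hcinv hvals]
      conv_rhs => rw [aloop]
      rw [hnone]

theorem contains_update_eq {κ ν : Type} [BEq κ] [LawfulBEq κ] (ps : List (κ × ν))
    (d : PySem.Dict κ ν) (k : κ) :
    (d.update ps).contains k = (d.contains k || ps.any (fun p => p.1 == k)) := by
  induction ps generalizing d with
  | nil => simp [PySem.Dict.update]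
  | cons p ps ih =>
    show ((d.insert p.1 p.2).update ps).contains k = _
    rw [ih, PySem.Dict.contains_insert]
    simp only [List.any_cons]
    cases h : (k == p.1)
    · have h2 : (p.1 == k) = false := by
        simp only [beq_eq_false_iff_ne] at h ⊢; exact fun e => h e.symm
      simp [h2]
    · have h2 : (p.1 == k) = true := by
        simp only [beq_iff_eq] at h ⊢; exact h.symm
      simp [h2]

theorem pvHasKey_eq (c : List (String × Int)) (k : String) :
    pvHasKey c k = (c.map Prod.fst).contains k := by
  show (PySem.Dict.empty.update c).contains k = _
  rw [contains_update_eq, PySem.Dict.contains_empty]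
  rw [Bool.eq_iff_iff]
  simp [List.any_eq_true, List.mem_map]

theorem pyDictEq_refl (c : List (String × Int)) : pyDictEq c c = true := by
  unfold pyDictEq
  simp only [beq_self_eq_true, Bool.true_and, List.all_eq_true]
  rintro ⟨k, v⟩ hkv
  rw [PySem.Dict.get?_of_mem_items _ hkv (PySem.Dict.nodup_keys_ofList c)]
  simp

theorem pyDictEq_id (c d : List (String × Int)) {i j : Int}
    (hc : (PySem.Dict.ofList c).get? "id" = some i)
    (hd : (PySem.Dict.ofList d).get? "id" = some j)
    (h : pyDictEq c d = true) : i = j := by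
  unfold pyDictEq at h
  rw [Bool.and_eq_true, List.all_eq_true] at h
  have hmem := PySem.Dict.mem_items_of_get?_eq_some _ hc
  have := h.2 _ hmem
  rw [beq_iff_eq] at this
  simp only at this
  rw [hd] at this
  exact (Option.some_injective _ this).symm

theorem buildDict_nodup_keys (categories : List (List (String × Int))) :
    (buildDict categories).keys.Nodup := by
  suffices h : ∀ (d : PySem.Dict Int (List (String × Int))), d.keys.Nodup →
      (categories.foldl (fun d c => if pvHasKey c "id_parent" then d.insert (pvCatId c) c else d) d).keys.Nodup by
    exact h PySem.Dict.empty (by simp [PySem.Dict.keys, PySem.Dict.empty])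
  induction categories with
  | nil => intro d hd; exact hd
  | cons c cats ih =>
    intro d hd
    simp only [List.foldl_cons]
    by_cases hc : pvHasKey c "id_parent" = true
    · rw [if_pos hc]; exact ih _ (PySem.Dict.nodup_keys_insert d (pvCatId c) c hd)
    · rw [if_neg hc]; exact ih _ hd

theorem items_map_contains {κ : Type} [BEq κ] (d1 : PySem.Dict κ (List (String × Int)))
    (d2 : PySem.Dict κ Int)
    (h : d2.items = d1.items.map (fun kv => (kv.1, pvCatParent kv.2))) (k : κ) :
    d2.contains k = d1.contains k := by
  show d2.items.any (fun p => p.1 == k) = d1.items.any (fun p => p.1 == k)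
  rw [h, List.any_map]
  rfl

theorem build_items_rel (categories : List (List (String × Int))) :
    (buildParent categories).items
      = (buildDict categories).items.map (fun kv => (kv.1, pvCatParent kv.2)) := by
  suffices h : ∀ (d1 : PySem.Dict Int (List (String × Int))) (d2 : PySem.Dict Int Int),
      d2.items = d1.items.map (fun kv => (kv.1, pvCatParent kv.2)) →
      (categories.foldl (fun d c => if pvHasKey c "id_parent" then d.insert (pvCatId c) (pvCatParent c) else d) d2).items
        = (categories.foldl (fun d c => if pvHasKey c "id_parent" then d.insert (pvCatId c) c else d) d1).items.map
            (fun kv => (kv.1, pvCatParent kv.2)) by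
    exact h PySem.Dict.empty PySem.Dict.empty rfl
  induction categories with
  | nil => intro d1 d2 h; exact h
  | cons c cats ih =>
    intro d1 d2 h
    simp only [List.foldl_cons]
    by_cases hc : pvHasKey c "id_parent" = true
    · rw [if_pos hc, if_pos hc]
      apply ih
      rw [PySem.Dict.items_insert, PySem.Dict.items_insert,
        items_map_contains d1 d2 h, h]
      by_cases hk : d1.contains (pvCatId c) = true
      · rw [if_pos hk, if_pos hk, List.map_map, List.map_map]
        apply List.map_congr_left
        rintro ⟨a, b⟩ _
        by_cases hab : a = pvCatId c <;> simp [hab]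
      · rw [if_neg hk, if_neg hk, List.map_append]
        rfl
    · rw [if_neg hc, if_neg hc]; exact ih d1 d2 h

theorem build_get?_rel (categories : List (List (String × Int))) (k : Int) :
    (buildParent categories).get? k = ((buildDict categories).get? k).map pvCatParent := by
  show ((buildParent categories).items.find? (fun p => p.1 == k)).map (fun x => x.2) = _
  rw [build_items_rel, List.find?_map]
  show _ = (((buildDict categories).items.find? (fun p => p.1 == k)).map (fun x => x.2)).map pvCatParent
  rcases h : (buildDict categories).items.find? (fun p => p.1 == k) with _ | p
  · have : ((fun p => p.1 == k) ∘ (fun kv => (kv.1, pvCatParent kv.2))) = (fun p : Int × List (String × Int) => p.1 == k) := rfl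
    rw [this, h]
    rfl
  · have : ((fun p => p.1 == k) ∘ (fun kv => (kv.1, pvCatParent kv.2))) = (fun p : Int × List (String × Int) => p.1 == k) := rfl
    rw [this, h]
    rfl

theorem build_size_rel (categories : List (List (String × Int))) :
    (buildParent categories).size = (buildDict categories).size := by
  show (buildParent categories).items.length = (buildDict categories).items.length
  rw [build_items_rel, List.length_map]

theorem build_keys_rel (categories : List (List (String × Int))) :
    (buildParent categories).keys = (buildDict categories).keys := by
  show (buildParent categories).items.map Prod.fst = (buildDict categories).items.map Prod.fst
  rw [build_items_rel, List.map_map]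
  rfl

theorem buildDict_id (categories : List (List (String × Int)))
    (hpre : Pre_find_loop_category categories) :
    ∀ k v, (buildDict categories).get? k = some v →
      (PySem.Dict.ofList v).get? "id" = some k := by
  suffices h : ∀ (cats : List (List (String × Int))) (d : PySem.Dict Int (List (String × Int))),
      (∀ c ∈ cats, (c.map Prod.fst).contains "id_parent" = true → (c.map Prod.fst).contains "id" = true) →
      (∀ k v, d.get? k = some v → (PySem.Dict.ofList v).get? "id" = some k) →
      ∀ k v, (cats.foldl (fun d c => if pvHasKey c "id_parent" then d.insert (pvCatId c) c else d) d).get? k = some v →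
        (PySem.Dict.ofList v).get? "id" = some k by
    exact h categories PySem.Dict.empty hpre
      (by intro k v hv; rw [PySem.Dict.get?_empty] at hv; exact absurd hv (by simp))
  intro cats
  induction cats with
  | nil => intro d _ hd; exact hd
  | cons c cats ih =>
    intro d hpre' hd
    simp only [List.foldl_cons]
    apply ih
    · intro c' hc'; exact hpre' c' (List.mem_cons_of_mem c hc')
    · by_cases hc : pvHasKey c "id_parent" = true
      · rw [if_pos hc]
        intro k v hv
        rw [PySem.Dict.get?_insert] at hv
        by_cases hk : k = pvCatId c
        · rw [if_pos hk] at hv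
          have hv' : v = c := (Option.some_injective _ hv).symm
          subst hv'
          have hid : pvHasKey v "id" = true := by
            rw [pvHasKey_eq]
            exact hpre' v (List.mem_cons_self) (by rw [← pvHasKey_eq]; exact hc)
          have : ((PySem.Dict.ofList v).get? "id").isSome := by
            rw [← PySem.Dict.contains_eq_isSome_get?]; exact hid
          obtain ⟨w, hw⟩ := Option.isSome_iff_exists.mp this
          rw [hw, hk]
          have : pvCatId v = w := PySem.Dict.getD_of_get?_eq_some _ 0 hw
          rw [← this]
        · rw [if_neg hk] at hv
          exact hd k v hv
      · rw [if_neg hc]; exact hd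

theorem drop_findIdx_head (v : List (String × Int)) (valP : Int → List (String × Int)) (k : Int) :
    ∀ (seen : List Int), (∀ s ∈ seen, (pyDictEq (valP s) v = true ↔ s = k)) → k ∈ seen →
      ∃ rest, ((seen.map valP).drop ((seen.map valP).findIdx (fun s => pyDictEq s v))) = valP k :: rest := by
  intro seen
  induction seen with
  | nil => intro _ h; exact absurd h (List.not_mem_nil)
  | cons s seen ih =>
    intro hiff hk
    simp only [List.map_cons, List.findIdx_cons]
    by_cases hs : pyDictEq (valP s) v = true
    · have : s = k := (hiff s List.mem_cons_self).mp hs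
      subst this
      rw [hs]
      exact ⟨seen.map valP, rfl⟩
    · have hsf : pyDictEq (valP s) v = false := Bool.not_eq_true _ ▸ (by simpa using hs)
      rw [hsf]
      simp only [Bool.cond_false, List.drop_succ_cons]
      have hk' : k ∈ seen := by
        rcases List.mem_cons.mp hk with h | h
        · exfalso; exact hs ((hiff s List.mem_cons_self).mpr h.symm)
        · exact h
      exact ih (fun t ht => hiff t (List.mem_cons_of_mem s ht)) hk'

theorem findLoop_eq_awalk (categories : List (List (String × Int)))
    (hpre : Pre_find_loop_category categories) :
    ∀ (f : Nat) (k : Int) (v : List (String × Int)) (seen : List Int),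
      (buildDict categories).get? k = some v →
      (∀ s ∈ seen, ∃ w, (buildDict categories).get? s = some w) →
      (match awalk (buildParent categories) f k seen with
       | none => findLoop (buildDict categories) f v (seen.map (fun s => (buildDict categories).getD s [])) = []
       | some c => ∃ rest,
           findLoop (buildDict categories) f v (seen.map (fun s => (buildDict categories).getD s []))
             = (buildDict categories).getD c [] :: rest ∧
           (buildDict categories).contains c = true) := by
  intro f
  induction f with
  | zero => intro k v seen _ _; simp [awalk, findLoop]
  | succ f ih =>
    intro k v seen hk hseen
    have hval : (buildDict categories).getD k [] = v := PySem.Dict.getD_of_get?_eq_some _ [] hk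
    have hid : (PySem.Dict.ofList v).get? "id" = some k := buildDict_id categories hpre k v hk
    have hmem_iff : ∀ s ∈ seen, (pyDictEq ((buildDict categories).getD s []) v = true ↔ s = k) := by
      intro s hs
      obtain ⟨w, hw⟩ := hseen s hs
      have hwval : (buildDict categories).getD s [] = w := PySem.Dict.getD_of_get?_eq_some _ [] hw
      have hwid : (PySem.Dict.ofList w).get? "id" = some s := buildDict_id categories hpre s w hw
      rw [hwval]
      constructor
      · intro h; exact pyDictEq_id w v hwid hid h
      · intro h
        subst h
        have : w = v := Option.some_injective _ (hw.symm.trans hk)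
        rw [this]; exact pyDictEq_refl v
    have hany : ((seen.map (fun s => (buildDict categories).getD s [])).any (fun s => pyDictEq s v)) = decide (k ∈ seen) := by
      rw [List.any_map]
      by_cases hkmem : k ∈ seen
      · rw [decide_eq_true hkmem]
        rw [List.any_eq_true]
        exact ⟨k, hkmem, (hmem_iff k hkmem).mpr rfl⟩
      · rw [decide_eq_false hkmem]
        rw [List.any_eq_false]
        intro s hs hcontra
        exact hkmem (((hmem_iff s hs).mp hcontra) ▸ hs)
    by_cases hkmem : k ∈ seen
    · -- repeat found
      have haw : awalk (buildParent categories) (f+1) k seen = some k := by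
        simp [awalk, hkmem]
      rw [haw]
      obtain ⟨rest, hrest⟩ := drop_findIdx_head v _ k seen hmem_iff hkmem
      refine ⟨rest, ?_, ?_⟩
      · show findLoop _ (f+1) v _ = _
        rw [findLoop]
        rw [hany, decide_eq_true hkmem]
        simp only [if_true]
        exact hrest
      · obtain ⟨w, hw⟩ := hseen k hkmem
        rw [PySem.Dict.contains_eq_isSome_get?, hw]; rfl
    · -- take a step
      have hpar : (buildParent categories).get? k = some (pvCatParent v) := by
        rw [build_get?_rel, hk]; rfl
      have haw : awalk (buildParent categories) (f+1) k seen
          = awalk (buildParent categories) f (pvCatParent v) (seen ++ [k]) := by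
        simp [awalk, hkmem, hpar]
      rw [haw]
      have hstack : (seen ++ [k]).map (fun s => (buildDict categories).getD s [])
          = (seen.map (fun s => (buildDict categories).getD s [])) ++ [v] := by
        rw [List.map_append, List.map_singleton, hval]
      rcases hpv : (buildDict categories).get? (pvCatParent v) with _ | parent
      · -- chain leaves the dict
        have hawnone : awalk (buildParent categories) f (pvCatParent v) (seen ++ [k]) = none := by
          cases f with
          | zero => rfl
          | succ f' =>
            have hnm : pvCatParent v ∉ seen ++ [k] := by
              intro hm
              rcases List.mem_append.mp hm with hm | hm
              · obtain ⟨w, hw⟩ := hseen _ hm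
                rw [hw] at hpv; simp at hpv
              · rw [List.mem_singleton] at hm
                rw [hm] at hpv; rw [hk] at hpv; simp at hpv
            have hpn : (buildParent categories).get? (pvCatParent v) = none := by
              rw [build_get?_rel, hpv]; rfl
            simp [awalk, hnm, hpn]
        rw [hawnone]
        show findLoop _ (f+1) v _ = []
        rw [findLoop, hany]
        simp [hpv]
        exact fun hmem => absurd hmem hkmem
      · -- recurse
        have ihres := ih (pvCatParent v) parent (seen ++ [k]) hpv (by
          intro s hs
          rcases List.mem_append.mp hs with hs | hs
          · exact hseen s hs
          · rw [List.mem_singleton] at hs; exact ⟨v, hs ▸ hk⟩)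
        have hfl : findLoop (buildDict categories) (f+1) v (seen.map (fun s => (buildDict categories).getD s []))
            = (let result := findLoop (buildDict categories) f parent ((seen ++ [k]).map (fun s => (buildDict categories).getD s []));
               if result.isEmpty then [] else result) := by
          rw [findLoop, hany]
          simp [hpv, hstack]
          exact fun hmem => absurd hmem hkmem
        rcases hres : awalk (buildParent categories) f (pvCatParent v) (seen ++ [k]) with _ | c
        · rw [hres] at ihres
          rw [hfl, ihres]
          rfl
        · rw [hres] at ihres
          obtain ⟨rest, hr1, hr2⟩ := ihres
          refine ⟨rest, ?_, hr2⟩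
          rw [hfl, hr1]
          rfl

theorem loopA_eq_aloop (categories : List (List (String × Int)))
    (hpre : Pre_find_loop_category categories) :
    ∀ (ks : List Int), (∀ k ∈ ks, ∃ w, (buildDict categories).get? k = some w) →
      loopA (buildDict categories) (ks.map (fun s => (buildDict categories).getD s []))
        = aloop (buildParent categories) ks := by
  intro ks
  induction ks with
  | nil => intro _; rfl
  | cons k ks ih =>
    intro hks
    obtain ⟨w, hw⟩ := hks k List.mem_cons_self
    have hval : (buildDict categories).getD k [] = w := PySem.Dict.getD_of_get?_eq_some _ [] hw
    have hfa := findLoop_eq_awalk categories hpre ((buildDict categories).size + 1) k w [] hw (by simp)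
    have hsize : (buildDict categories).size = (buildParent categories).size := (build_size_rel categories).symm
    simp only [List.map_cons, List.map_nil] at *
    rcases haw : awalk (buildParent categories) ((buildParent categories).size + 1) k [] with _ | c
    · rw [hsize] at hfa
      rw [haw] at hfa
      show loopA _ (_ :: _) = _
      rw [loopA, hval, hsize]
      rw [hfa]
      rw [aloop, haw]
      exact ih (fun t ht => hks t (List.mem_cons_of_mem k ht))
    · rw [hsize, haw] at hfa
      obtain ⟨rest, hr1, hr2⟩ := hfa
      show loopA _ (_ :: _) = _
      rw [loopA, hval, hsize]
      rw [hr1]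
      rw [aloop, haw]
      have hcsome : ((buildDict categories).get? c).isSome := by
        rw [← PySem.Dict.contains_eq_isSome_get?]; exact hr2
      obtain ⟨w', hw'⟩ := Option.isSome_iff_exists.mp hcsome
      have : (buildDict categories).getD c [] = w' := PySem.Dict.getD_of_get?_eq_some _ [] hw'
      rw [this]
      exact buildDict_id categories hpre c w' hw'

-- ===== VERDICT (by name: the statement is the Claim_ definition above) =====
theorem find_loop_category_spec : Claim_equal_find_loop_category := by
  intro categories _hdom hpre
  unfold Spec_find_loop_category
  show find_loop_category categories = find_loop_category_alt categories
  show loopA (buildDict categories) (buildDict categories).values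
      = bloop (buildParent categories) (buildParent categories).keys PySem.Dict.empty
  have hvals : (buildDict categories).values
      = (buildDict categories).keys.map (fun k => (buildDict categories).getD k []) :=
    PySem.Dict.values_eq_map_keys _ (buildDict_nodup_keys categories) []
  rw [hvals]
  rw [loopA_eq_aloop categories hpre (buildDict categories).keys (fun k hk => by
    have hc : (buildDict categories).contains k = true :=
      (PySem.Dict.contains_iff_mem_keys _ k).mpr hk
    rw [PySem.Dict.contains_eq_isSome_get?] at hc
    exact Option.isSome_iff_exists.mp hc)]
  rw [← build_keys_rel]
  exact (bloop_eq_aloop (buildParent categories) (buildParent categories).keys PySem.Dict.empty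
    (fun d hd => absurd (PySem.Dict.getD_empty d 0) hd)
    (fun d => Or.inl (PySem.Dict.getD_empty d 0))).symm
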